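-- pv_equiv track=rewrite | github.com/mojoro/advent-of-code-2023 | puzzle-1-and-2.py | findNumFromText
-- ===== SOURCE A (Python) =====
-- def findNumFromText(line):
--     first_num = None
--     final_num = None
--     switcher = {
--         "one": 1,
--         "two": 2,
--         "three": 3,
--         "four": 4,
--         "five": 5,
--         "six": 6,
--         "seven": 7,
--         "eight": 8,
--         "nine": 9
--     }
--
--     for i in range(len(line)):
--         for word in switcher.keys():
--             if line[i:i+len(word)] == word:
--                 if first_num == None:
--                     first_num = {"num": switcher[word], "index": i}
--                 elif first_num != None:
--                     final_num = {"num": switcher[word], "index": i}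
--     if first_num != None and final_num == None:
--         final_num = first_num
--     return (first_num, final_num)
-- ===== SOURCE B (Python) =====
-- def findNumFromText(line):
--     words = [("one", 1), ("two", 2), ("three", 3), ("four", 4), ("five", 5),
--              ("six", 6), ("seven", 7), ("eight", 8), ("nine", 9)]
--     first = None  # (index, num) of earliest occurrence
--     last = None   # (index, num) of latest occurrence
--     for word, num in words:
--         i = line.find(word)
--         if i == -1:
--             continue
--         j = line.rfind(word)
--         if first is None or i < first[0]:
--             first = (i, num)
--         if last is None or j > last[0]:
--             last = (j, num)
--     if first is None or last is None:
--         return (None, None)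
--     return ({"num": first[1], "index": first[0]},
--             {"num": last[1], "index": last[0]})
-- ===== Notes on version B (the rewrite author's own statement) =====
-- stated objective: faster
-- what changed: Position-major scan (every index, inner loop over the nine words, slicing and mutating first/final) replaced by a word-major pass: for each word take line.find and line.rfind once and keep the minimal find index and the maximal rfind index.
import Mathlib
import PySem

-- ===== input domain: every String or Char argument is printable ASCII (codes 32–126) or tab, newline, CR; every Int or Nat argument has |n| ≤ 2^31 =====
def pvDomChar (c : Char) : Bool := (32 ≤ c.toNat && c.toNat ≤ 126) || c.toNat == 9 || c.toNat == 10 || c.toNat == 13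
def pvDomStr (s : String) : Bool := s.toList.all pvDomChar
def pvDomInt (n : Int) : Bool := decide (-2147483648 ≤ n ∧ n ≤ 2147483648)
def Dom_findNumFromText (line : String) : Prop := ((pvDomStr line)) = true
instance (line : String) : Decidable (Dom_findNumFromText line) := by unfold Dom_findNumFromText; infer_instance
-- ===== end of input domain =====

-- B replaces A's position-major scan by a word-major pass over the nine digit words using
-- line.find/line.rfind; proved to return the same pair on every input.

-- ===== PORT A =====
-- A's switcher dict (a local constant in the Python, hoisted).
def pvSwitcher : PySem.Dict String Int := PySem.Dict.ofList
  [("one", 1), ("two", 2), ("three", 3), ("four", 4), ("five", 5),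
   ("six", 6), ("seven", 7), ("eight", 8), ("nine", 9)]

def findNumFromText (line : String) : (Option (List (String × Int))) × (Option (List (String × Int))) :=
  match
    (PySem.List.pyRange 0 (PySem.Str.len line) 1).foldl
      (fun (st : Option (List (String × Int)) × Option (List (String × Int))) i =>
        (PySem.Dict.keys pvSwitcher).foldl
          (fun st word =>
            if PySem.Str.slice line (some i) (some (i + (PySem.Str.len word : Int))) = word then
              match st.1 with
              | none => (some [("num", pvSwitcher.getD word 0), ("index", i)], st.2)
              | some _ => (st.1, some [("num", pvSwitcher.getD word 0), ("index", i)])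
            else st)
          st)
      (none, none)
  with
  | (some f, none) => (some f, some f)
  | r => r

-- ===== PORT B =====
def findNumFromText_alt (line : String) : (Option (List (String × Int))) × (Option (List (String × Int))) :=
  match
    ([("one", 1), ("two", 2), ("three", 3), ("four", 4), ("five", 5),
      ("six", 6), ("seven", 7), ("eight", 8), ("nine", 9)] : List (String × Int)).foldl
      (fun (st : Option (Int × Int) × Option (Int × Int)) wv =>
        let i := PySem.Str.find line wv.1
        if i = -1 then st
        else
          let j := PySem.Str.rfind line wv.1
          (match st.1 with
           | none => some (i, wv.2)
           | some p => if i < p.1 then some (i, wv.2) else st.1,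
           match st.2 with
           | none => some (j, wv.2)
           | some p => if p.1 < j then some (j, wv.2) else st.2))
      (none, none)
  with
  | (first, last) =>
    match first with
    | none => (none, none)
    | some f =>
      match last with
      | none => (none, none)
      | some l => (some [("num", f.2), ("index", f.1)], some [("num", l.2), ("index", l.1)])

-- ===== PRECONDITION & SPEC =====
def Spec_findNumFromText (line : String) (out : (Option (List (String × Int))) × (Option (List (String × Int)))) : Prop := out = findNumFromText_alt line
instance (line : String) (out : (Option (List (String × Int))) × (Option (List (String × Int)))) : Decidable (Spec_findNumFromText line out) := by unfold Spec_findNumFromText; infer_instance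

-- ===== CLAIM (what is proved, stated in full; the proofs are below) =====
def Claim_equal_findNumFromText : Prop := ∀ (line : String), Dom_findNumFromText line → Spec_findNumFromText line (findNumFromText line)

-- ===== LEMMAS AND PROOFS =====

-- The nine digit words with their values (proof-side table).
def pvW : List (String × Int) :=
  [("one", 1), ("two", 2), ("three", 3), ("four", 4), ("five", 5),
   ("six", 6), ("seven", 7), ("eight", 8), ("nine", 9)]

-- The dict {"num": v, "index": i} as an association list.
def pvDict (e : Int × Int) : List (String × Int) := [("num", e.2), ("index", e.1)]

-- Events at position k: the words of pvW matching there (in word order), as (position, value).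
def pvEvts (line : String) (k : Nat) : List (Int × Int) :=
  (pvW.filter (fun wv => wv.1.toList.isPrefixOf (line.toList.drop k))).map
    (fun wv => ((k : Int), wv.2))

-- All match events of the line, position-major (A's scan order).
def pvMatches (line : String) : List (Int × Int) :=
  (List.range line.toList.length).flatMap (pvEvts line)

-- A's per-event update of (first_num, final_num).
def pvStepA (st : Option (List (String × Int)) × Option (List (String × Int)))
    (e : Int × Int) : Option (List (String × Int)) × Option (List (String × Int)) :=
  match st.1 with
  | none => (some (pvDict e), st.2)
  | some _ => (st.1, some (pvDict e))

-- B's two per-word updates, one per component.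
def pvG1 (line : String) (st : Option (Int × Int)) (wv : String × Int) : Option (Int × Int) :=
  let i := PySem.Str.find line wv.1
  if i = -1 then st
  else match st with
       | none => some (i, wv.2)
       | some p => if i < p.1 then some (i, wv.2) else st

def pvG2 (line : String) (st : Option (Int × Int)) (wv : String × Int) : Option (Int × Int) :=
  let i := PySem.Str.find line wv.1
  if i = -1 then st
  else
    let j := PySem.Str.rfind line wv.1
    match st with
    | none => some (j, wv.2)
    | some p => if p.1 < j then some (j, wv.2) else st

-- ---------- facts about the word table ----------

lemma pvW_ne_nil_words : ∀ wv ∈ pvW, wv.1.toList ≠ [] := by decide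

lemma pvW_prefix_eq : ∀ p ∈ pvW, ∀ q ∈ pvW, p.1.toList <+: q.1.toList → p = q := by decide

-- two words of pvW matching at the same suffix are the same pair
lemma pvUniq {t : List Char} {p q : String × Int} (hp : p ∈ pvW) (hq : q ∈ pvW)
    (h1 : p.1.toList <+: t) (h2 : q.1.toList <+: t) : p = q := by
  rcases le_total p.1.toList.length q.1.toList.length with h | h
  · exact pvW_prefix_eq p hp q hq (List.prefix_of_prefix_length_le h1 h2 h)
  · exact (pvW_prefix_eq q hq p hp (List.prefix_of_prefix_length_le h2 h1 h)).symm

-- ---------- pvMatches facts ----------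

lemma mem_pvMatches {line : String} {e : Int × Int} :
    e ∈ pvMatches line ↔
      ∃ (k : Nat) (wv : String × Int), wv ∈ pvW ∧ wv.1.toList <+: line.toList.drop k ∧
        e = ((k : Int), wv.2) := by
  unfold pvMatches pvEvts
  simp only [List.mem_flatMap, List.mem_range, List.mem_map, List.mem_filter,
    List.isPrefixOf_iff_prefix]
  constructor
  · rintro ⟨k, _, wv, ⟨hwv, hpre⟩, rfl⟩
    exact ⟨k, wv, hwv, hpre, rfl⟩
  · rintro ⟨k, wv, hwv, hpre, rfl⟩
    refine ⟨k, ?_, wv, ⟨hwv, hpre⟩, rfl⟩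
    by_contra hcon
    push Not at hcon
    rw [List.drop_eq_nil_iff.mpr (by omega)] at hpre
    exact pvW_ne_nil_words wv hwv (List.prefix_nil.mp hpre)

lemma pvMatches_pairwise (line : String) :
    (pvMatches line).Pairwise (fun a b => a.1 ≤ b.1) := by
  unfold pvMatches
  rw [List.pairwise_flatMap]
  constructor
  · intro k _
    unfold pvEvts
    exact List.Pairwise.map (R := fun _ _ => True) _ (fun _ _ _ => le_refl _)
      (List.Pairwise.filter (R := fun _ _ => True) _
        (List.pairwise_of_forall (fun _ _ => trivial)))
  · refine (List.pairwise_lt_range).imp ?_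
    intro k1 k2 hlt x hx y hy
    unfold pvEvts at hx hy
    simp only [List.mem_map] at hx hy
    obtain ⟨_, _, rfl⟩ := hx
    obtain ⟨_, _, rfl⟩ := hy
    show (k1 : Int) ≤ (k2 : Int)
    exact_mod_cast le_of_lt hlt

-- every member's position is at most the last one's (for a position-sorted list)
lemma pvLe_getLast (l : List (Int × Int)) (h : l.Pairwise (fun a b => a.1 ≤ b.1))
    (x : Int × Int) (hx : x ∈ l) (hl : l ≠ []) : x.1 ≤ (l.getLast hl).1 := by
  induction l with
  | nil => cases hx
  | cons a t ih =>
    rcases List.pairwise_cons.mp h with ⟨ha, ht⟩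
    cases t with
    | nil =>
      simp only [List.mem_singleton] at hx
      simp [hx]
    | cons b u =>
      rw [List.getLast_cons (by simp)]
      rcases List.mem_cons.mp hx with rfl | hx'
      · exact ha _ (List.getLast_mem _)
      · exact ih ht hx' (by simp)

-- ---------- A's characterization ----------

-- the slice test of A is a prefix test
lemma pvCond (line w : String) (k : Nat) :
    (PySem.Str.slice line (some (k:Int)) (some ((k:Int) + (PySem.Str.len w : Int))) = w) ↔
      (w.toList.isPrefixOf (line.toList.drop k) = true) := by
  rw [← String.toList_inj]
  have hlen : (PySem.Str.len w : Int) = ((w.toList.length : Nat) : Int) := by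
    simp [PySem.Str.len_eq]
  rw [PySem.Str.toList_slice, PySem.Chars.slice_eq_listSlice, hlen,
    PySem.List.slice_natCast_add, List.isPrefixOf_iff_prefix, List.prefix_iff_eq_take, eq_comm]

-- A's inner word loop at position k performs pvStepA on the events at k
lemma pvInner (line : String) (k : Nat)
    (st : Option (List (String × Int)) × Option (List (String × Int))) :
    pvW.foldl
      (fun st wv =>
        if PySem.Str.slice line (some (k:Int)) (some ((k:Int) + PySem.Str.len wv.1)) = wv.1 then
          match st.1 with
          | none => (some [("num", pvSwitcher.getD wv.1 0), ("index", (k:Int))], st.2)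
          | some _ => (st.1, some [("num", pvSwitcher.getD wv.1 0), ("index", (k:Int))])
        else st) st
    = (pvEvts line k).foldl pvStepA st := by
  unfold pvEvts
  rw [List.foldl_map, List.foldl_filter]
  apply PySem.List.foldl_congr_mem
  intro s wv hwv
  have hval : pvSwitcher.getD wv.1 0 = wv.2 := by
    fin_cases hwv <;> rfl
  rw [hval]
  by_cases hq : wv.1.toList.isPrefixOf (line.toList.drop k) = true
  · rw [if_pos ((pvCond line wv.1 k).mpr hq), if_pos hq]
    rfl
  · rw [if_neg (fun hc => hq ((pvCond line wv.1 k).mp hc)), if_neg hq]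

-- once first_num is set it is frozen and final_num tracks the last event
lemma pvFoldA_snd (E : List (Int × Int)) (f : List (String × Int)) (l0 : Option (List (String × Int))) :
    E.foldl pvStepA (some f, l0) = (some f, (E.getLast?.map pvDict).or l0) := by
  induction E generalizing l0 with
  | nil => simp
  | cons e t ih =>
    rw [List.foldl_cons, show pvStepA (some f, l0) e = (some f, some (pvDict e)) from rfl, ih]
    cases t with
    | nil => simp
    | cons b u =>
      rw [List.getLast?_cons_cons]
      cases h : (b :: u).getLast? with
      | none => simp at h
      | some x => simp

lemma pvA_eq (line : String) :
    findNumFromText line =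
      (((pvMatches line).head?).map pvDict, ((pvMatches line).getLast?).map pvDict) := by
  unfold findNumFromText
  rw [show PySem.Dict.keys pvSwitcher = pvW.map (·.1) from rfl]
  have hn : PySem.Str.len line = ((line.toList.length : Nat) : Int) := by
    simp [PySem.Str.len_eq]
  rw [hn, PySem.List.pyRange_one]
  simp only [Int.sub_zero, Int.toNat_natCast, zero_add, List.foldl_map]
  rw [PySem.List.foldl_congr_mem (List.range line.toList.length) _ _ _
    (fun acc x _ => pvInner line x acc)]
  rw [← List.foldl_flatMap]
  rw [show (List.range line.toList.length).flatMap (pvEvts line) = pvMatches line from rfl]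
  cases hE : pvMatches line with
  | nil => rfl
  | cons e t =>
    rw [List.foldl_cons, show pvStepA (none, none) e = (some (pvDict e), none) from rfl,
      pvFoldA_snd]
    cases t with
    | nil => rfl
    | cons b u =>
      rw [List.getLast?_cons_cons]
      cases h : (b :: u).getLast? with
      | none => simp at h
      | some x => simp

-- ---------- find / rfind facts ----------

lemma pvFind_occ {line w : String} {k : Nat} (hpre : w.toList <+: line.toList.drop k) :
    PySem.Str.find line w ≠ -1 := by
  rw [PySem.Str.find_eq]
  exact (PySem.Chars.find_ne_neg_one_iff _ _).mpr
    ((PySem.Chars.isIn_iff_infix _ _).mp ((PySem.Chars.exists_prefix_drop_iff_isIn _ _).mp ⟨k, hpre⟩))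

lemma pvFind_spec {line w : String} (h : PySem.Str.find line w ≠ -1) :
    0 ≤ PySem.Str.find line w ∧
    w.toList <+: line.toList.drop (PySem.Str.find line w).toNat ∧
    ∀ i < (PySem.Str.find line w).toNat, ¬ w.toList <+: line.toList.drop i := by
  rw [PySem.Str.find_eq] at *
  have hinf := (PySem.Chars.find_ne_neg_one_iff _ _).mp h
  have hnn := (PySem.Chars.find_nonneg_iff _ _).mpr hinf
  exact ⟨hnn, PySem.Chars.find_spec hnn⟩

lemma pvRfindGo_spec (s sub : List Char) (j : Nat) :
    (PySem.Chars.rfind.go s sub j = -1 ∧ ∀ k ≤ j, ¬ sub <+: s.drop k) ∨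
    (∃ k : Nat, k ≤ j ∧ PySem.Chars.rfind.go s sub j = (k : Int) ∧ sub <+: s.drop k ∧
      ∀ m, k < m → m ≤ j → ¬ sub <+: s.drop m) := by
  induction j with
  | zero =>
    rw [PySem.Chars.rfind.go]
    by_cases h : sub.isPrefixOf s
    · right
      exact ⟨0, le_refl _, by simp [h], by simpa using List.isPrefixOf_iff_prefix.mp h, by omega⟩
    · left
      refine ⟨by simp [h], ?_⟩
      intro k hk
      interval_cases k
      simpa using fun hc => h (List.isPrefixOf_iff_prefix.mpr hc)
  | succ j ih =>
    rw [PySem.Chars.rfind.go]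
    by_cases h : sub.isPrefixOf (s.drop (j+1))
    · right
      refine ⟨j+1, le_refl _, by simp [h], List.isPrefixOf_iff_prefix.mp h, ?_⟩
      intro m h1 h2
      omega
    · simp only [h, Bool.false_eq_true, if_false]
      rcases ih with ⟨he, hall⟩ | ⟨k, hk, he, hpre, hmax⟩
      · left
        refine ⟨he, ?_⟩
        intro k hk
        rcases Nat.lt_succ_iff_lt_or_eq.mp (Nat.lt_succ_of_le hk) with h' | rfl
        · exact hall k (by omega)
        · exact fun hc => h (List.isPrefixOf_iff_prefix.mpr hc)
      · right
        refine ⟨k, by omega, he, hpre, ?_⟩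
        intro m h1 h2
        rcases Nat.le_succ_iff.mp h2 with h' | rfl
        · exact hmax m h1 h'
        · exact fun hc => h (List.isPrefixOf_iff_prefix.mpr hc)

lemma pvRfind_spec (line w : String) (hw : w.toList ≠ []) (h : PySem.Str.find line w ≠ -1) :
    ∃ k : Nat, PySem.Str.rfind line w = (k : Int) ∧ w.toList <+: line.toList.drop k ∧
      ∀ m : Nat, k < m → ¬ w.toList <+: line.toList.drop m := by
  have hocc : ∃ j : Nat, w.toList <+: line.toList.drop j := by
    obtain ⟨hnn, hpre, -⟩ := pvFind_spec h
    exact ⟨_, hpre⟩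
  rw [PySem.Str.rfind_eq]
  show ∃ k : Nat, PySem.Chars.rfind line.toList w.toList = (k:Int) ∧ _ ∧ _
  have hgo := pvRfindGo_spec line.toList w.toList line.toList.length
  rw [show PySem.Chars.rfind.go line.toList w.toList line.toList.length
      = PySem.Chars.rfind line.toList w.toList from rfl] at hgo
  rcases hgo with ⟨-, hall⟩ | ⟨k, hk, heq, hpre, hmax⟩
  · obtain ⟨j, hj⟩ := hocc
    by_cases hjl : j ≤ line.toList.length
    · exact absurd hj (hall j hjl)
    · rw [List.drop_eq_nil_iff.mpr (by omega)] at hj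
      exact absurd (List.prefix_nil.mp hj) hw
  · refine ⟨k, heq, hpre, ?_⟩
    intro m h1
    by_cases hml : m ≤ line.toList.length
    · exact hmax m h1 hml
    · intro hc
      rw [List.drop_eq_nil_iff.mpr (by omega)] at hc
      exact hw (List.prefix_nil.mp hc)

-- ---------- B's fold lemmas ----------

lemma pvG1_skip (line : String) (st : Option (Int × Int)) (wv : String × Int)
    (hf : PySem.Str.find line wv.1 = -1) : pvG1 line st wv = st := by
  simp only [pvG1]
  rw [if_pos hf]

lemma pvG1_none (line : String) (wv : String × Int)
    (hf : ¬ PySem.Str.find line wv.1 = -1) :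
    pvG1 line none wv = some (PySem.Str.find line wv.1, wv.2) := by
  simp only [pvG1]
  rw [if_neg hf]

lemma pvG1_some (line : String) (p : Int × Int) (wv : String × Int)
    (hf : ¬ PySem.Str.find line wv.1 = -1) :
    pvG1 line (some p) wv =
      if PySem.Str.find line wv.1 < p.1 then some (PySem.Str.find line wv.1, wv.2)
      else some p := by
  simp only [pvG1]
  rw [if_neg hf]

lemma pvG2_skip (line : String) (st : Option (Int × Int)) (wv : String × Int)
    (hf : PySem.Str.find line wv.1 = -1) : pvG2 line st wv = st := by
  simp only [pvG2]
  rw [if_pos hf]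

lemma pvG2_none (line : String) (wv : String × Int)
    (hf : ¬ PySem.Str.find line wv.1 = -1) :
    pvG2 line none wv = some (PySem.Str.rfind line wv.1, wv.2) := by
  simp only [pvG2]
  rw [if_neg hf]

lemma pvG2_some (line : String) (p : Int × Int) (wv : String × Int)
    (hf : ¬ PySem.Str.find line wv.1 = -1) :
    pvG2 line (some p) wv =
      if p.1 < PySem.Str.rfind line wv.1 then some (PySem.Str.rfind line wv.1, wv.2)
      else some p := by
  simp only [pvG2]
  rw [if_neg hf]

lemma pvFoldG1_min (line : String) (i1 v1 : Int) (ws : List (String × Int))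
    (hlb : ∀ wv ∈ ws, PySem.Str.find line wv.1 = -1 ∨ i1 ≤ PySem.Str.find line wv.1)
    (huq : ∀ wv ∈ ws, PySem.Str.find line wv.1 = i1 → wv.2 = v1)
    (hne : i1 ≠ -1)
    (st0 : Option (Int × Int))
    (hst : (∃ wv ∈ ws, PySem.Str.find line wv.1 = i1) ∧
             (st0 = none ∨ ∃ p, st0 = some p ∧ i1 ≤ p.1 ∧ (p.1 = i1 → p.2 = v1))
           ∨ st0 = some (i1, v1)) :
    ws.foldl (pvG1 line) st0 = some (i1, v1) := by
  induction ws generalizing st0 with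
  | nil =>
    rcases hst with ⟨⟨wv, hwv, _⟩, _⟩ | rfl
    · cases hwv
    · rfl
  | cons wv t ih =>
    rw [List.foldl_cons]
    refine ih (fun x hx => hlb x (List.mem_cons_of_mem _ hx))
      (fun x hx => huq x (List.mem_cons_of_mem _ hx)) _ ?_
    rcases hst with ⟨⟨w0, hw0, hw0eq⟩, hinv⟩ | rfl
    · by_cases hf : PySem.Str.find line wv.1 = -1
      · rw [pvG1_skip line st0 wv hf]
        rcases List.mem_cons.mp hw0 with rfl | hw0t
        · rw [hw0eq] at hf; exact absurd hf hne
        · exact Or.inl ⟨⟨w0, hw0t, hw0eq⟩, hinv⟩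
      · have hge : i1 ≤ PySem.Str.find line wv.1 :=
          (hlb wv (List.mem_cons_self)).resolve_left hf
        by_cases heq : PySem.Str.find line wv.1 = i1
        · have hv : wv.2 = v1 := huq wv (List.mem_cons_self) heq
          right
          rcases hinv with rfl | ⟨p, rfl, hple, hpv⟩
          · rw [pvG1_none line wv hf, heq, hv]
          · rw [pvG1_some line p wv hf]
            by_cases hlt : PySem.Str.find line wv.1 < p.1
            · rw [if_pos hlt, heq, hv]
            · have hp1 : p.1 = i1 := by omega
              have hp : p = (i1, v1) := Prod.ext_iff.mpr ⟨hp1, hpv hp1⟩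
              rw [if_neg hlt, hp]
        · have hgt : i1 < PySem.Str.find line wv.1 := lt_of_le_of_ne hge (Ne.symm heq)
          left
          refine ⟨⟨w0, ?_, hw0eq⟩, ?_⟩
          · rcases List.mem_cons.mp hw0 with rfl | h'
            · exact absurd hw0eq heq
            · exact h'
          · rcases hinv with rfl | ⟨p, rfl, hple, hpv⟩
            · exact Or.inr ⟨(PySem.Str.find line wv.1, wv.2), pvG1_none line wv hf,
                le_of_lt hgt, fun h => absurd h (by omega)⟩
            · rw [pvG1_some line p wv hf]
              by_cases hlt : PySem.Str.find line wv.1 < p.1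
              · exact Or.inr ⟨(PySem.Str.find line wv.1, wv.2), by rw [if_pos hlt],
                  le_of_lt hgt, fun h => absurd h (by omega)⟩
              · exact Or.inr ⟨p, by rw [if_neg hlt], hple, hpv⟩
    · right
      by_cases hf : PySem.Str.find line wv.1 = -1
      · exact pvG1_skip line _ wv hf
      · have hge : i1 ≤ PySem.Str.find line wv.1 :=
          (hlb wv (List.mem_cons_self)).resolve_left hf
        rw [pvG1_some line (i1, v1) wv hf, if_neg (by simp only []; omega)]

lemma pvFoldG2_max (line : String) (j1 v1 : Int) (ws : List (String × Int))
    (hub : ∀ wv ∈ ws, PySem.Str.find line wv.1 = -1 ∨ PySem.Str.rfind line wv.1 ≤ j1)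
    (huq : ∀ wv ∈ ws, PySem.Str.find line wv.1 ≠ -1 → PySem.Str.rfind line wv.1 = j1 → wv.2 = v1)
    (st0 : Option (Int × Int))
    (hst : (∃ wv ∈ ws, PySem.Str.find line wv.1 ≠ -1 ∧ PySem.Str.rfind line wv.1 = j1) ∧
             (st0 = none ∨ ∃ p, st0 = some p ∧ p.1 ≤ j1 ∧ (p.1 = j1 → p.2 = v1))
           ∨ st0 = some (j1, v1)) :
    ws.foldl (pvG2 line) st0 = some (j1, v1) := by
  induction ws generalizing st0 with
  | nil =>
    rcases hst with ⟨⟨wv, hwv, _⟩, _⟩ | rfl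
    · cases hwv
    · rfl
  | cons wv t ih =>
    rw [List.foldl_cons]
    refine ih (fun x hx => hub x (List.mem_cons_of_mem _ hx))
      (fun x hx => huq x (List.mem_cons_of_mem _ hx)) _ ?_
    rcases hst with ⟨⟨w0, hw0, hw0f, hw0eq⟩, hinv⟩ | rfl
    · by_cases hf : PySem.Str.find line wv.1 = -1
      · rw [pvG2_skip line st0 wv hf]
        rcases List.mem_cons.mp hw0 with rfl | hw0t
        · exact absurd hf hw0f
        · exact Or.inl ⟨⟨w0, hw0t, hw0f, hw0eq⟩, hinv⟩
      · have hle : PySem.Str.rfind line wv.1 ≤ j1 :=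
          (hub wv (List.mem_cons_self)).resolve_left hf
        by_cases heq : PySem.Str.rfind line wv.1 = j1
        · have hv : wv.2 = v1 := huq wv (List.mem_cons_self) hf heq
          right
          rcases hinv with rfl | ⟨p, rfl, hple, hpv⟩
          · rw [pvG2_none line wv hf, heq, hv]
          · rw [pvG2_some line p wv hf]
            by_cases hlt : p.1 < PySem.Str.rfind line wv.1
            · rw [if_pos hlt, heq, hv]
            · have hp1 : p.1 = j1 := by omega
              have hp : p = (j1, v1) := Prod.ext_iff.mpr ⟨hp1, hpv hp1⟩
              rw [if_neg hlt, hp]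
        · have hgt : PySem.Str.rfind line wv.1 < j1 := lt_of_le_of_ne hle heq
          left
          refine ⟨⟨w0, ?_, hw0f, hw0eq⟩, ?_⟩
          · rcases List.mem_cons.mp hw0 with rfl | h'
            · exact absurd hw0eq heq
            · exact h'
          · rcases hinv with rfl | ⟨p, rfl, hple, hpv⟩
            · exact Or.inr ⟨(PySem.Str.rfind line wv.1, wv.2), pvG2_none line wv hf,
                le_of_lt hgt, fun h => absurd h (by omega)⟩
            · rw [pvG2_some line p wv hf]
              by_cases hlt : p.1 < PySem.Str.rfind line wv.1
              · exact Or.inr ⟨(PySem.Str.rfind line wv.1, wv.2), by rw [if_pos hlt],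
                  le_of_lt hgt, fun h => absurd h (by omega)⟩
              · exact Or.inr ⟨p, by rw [if_neg hlt], hple, hpv⟩
    · right
      by_cases hf : PySem.Str.find line wv.1 = -1
      · exact pvG2_skip line _ wv hf
      · have hle : PySem.Str.rfind line wv.1 ≤ j1 :=
          (hub wv (List.mem_cons_self)).resolve_left hf
        rw [pvG2_some line (j1, v1) wv hf, if_neg (by simp only []; omega)]

lemma pvFoldG1_nohit (line : String) (ws : List (String × Int))
    (h : ∀ wv ∈ ws, PySem.Str.find line wv.1 = -1) :
    ws.foldl (pvG1 line) none = none := by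
  induction ws with
  | nil => rfl
  | cons wv t ih =>
    rw [List.foldl_cons, pvG1_skip line none wv (h wv (List.mem_cons_self))]
    exact ih (fun x hx => h x (List.mem_cons_of_mem _ hx))

lemma pvFoldG2_nohit (line : String) (ws : List (String × Int))
    (h : ∀ wv ∈ ws, PySem.Str.find line wv.1 = -1) :
    ws.foldl (pvG2 line) none = none := by
  induction ws with
  | nil => rfl
  | cons wv t ih =>
    rw [List.foldl_cons, pvG2_skip line none wv (h wv (List.mem_cons_self))]
    exact ih (fun x hx => h x (List.mem_cons_of_mem _ hx))

lemma pvFoldB_split (line : String) (ws : List (String × Int))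
    (st : Option (Int × Int) × Option (Int × Int)) :
    ws.foldl
      (fun (st : Option (Int × Int) × Option (Int × Int)) wv =>
        let i := PySem.Str.find line wv.1
        if i = -1 then st
        else
          let j := PySem.Str.rfind line wv.1
          (match st.1 with
           | none => some (i, wv.2)
           | some p => if i < p.1 then some (i, wv.2) else st.1,
           match st.2 with
           | none => some (j, wv.2)
           | some p => if p.1 < j then some (j, wv.2) else st.2)) st
    = (ws.foldl (pvG1 line) st.1, ws.foldl (pvG2 line) st.2) := by
  induction ws generalizing st with
  | nil => rfl
  | cons wv t ih =>
    rw [List.foldl_cons, ih, List.foldl_cons, List.foldl_cons]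
    simp only [pvG1, pvG2]
    by_cases hf : PySem.Str.find line wv.1 = -1
    · rw [if_pos hf, if_pos hf, if_pos hf]
    · rw [if_neg hf, if_neg hf, if_neg hf]

-- ---------- B's characterization ----------

lemma pvB_eq (line : String) :
    findNumFromText_alt line =
      (((pvMatches line).head?).map pvDict, ((pvMatches line).getLast?).map pvDict) := by
  unfold findNumFromText_alt
  rw [show ([("one", 1), ("two", 2), ("three", 3), ("four", 4), ("five", 5),
      ("six", 6), ("seven", 7), ("eight", 8), ("nine", 9)] : List (String × Int)) = pvW from rfl]
  rw [pvFoldB_split]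
  cases hE : pvMatches line with
  | nil =>
    have hall : ∀ wv ∈ pvW, PySem.Str.find line wv.1 = -1 := by
      intro wv hwv
      by_contra hf
      obtain ⟨-, hpre, -⟩ := pvFind_spec hf
      have hm : ((((PySem.Str.find line wv.1).toNat : Nat) : Int), wv.2) ∈ pvMatches line :=
        mem_pvMatches.mpr ⟨_, wv, hwv, hpre, rfl⟩
      rw [hE] at hm
      cases hm
    rw [pvFoldG1_nohit line pvW hall, pvFoldG2_nohit line pvW hall]
    rfl
  | cons e t =>
    have hcne : (e :: t) ≠ [] := by simp
    have hpw := pvMatches_pairwise line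
    rw [hE] at hpw
    have hhead : ∀ x ∈ pvMatches line, e.1 ≤ x.1 := by
      intro x hx
      rw [hE] at hx
      rcases List.mem_cons.mp hx with rfl | hx'
      · exact le_refl _
      · exact (List.pairwise_cons.mp hpw).1 x hx'
    have hlastAll : ∀ x ∈ pvMatches line, x.1 ≤ ((e :: t).getLast hcne).1 := by
      intro x hx
      rw [hE] at hx
      exact pvLe_getLast (e :: t) hpw x hx hcne
    have hmem1 : e ∈ pvMatches line := by rw [hE]; exact List.mem_cons_self
    have hmemL : (e :: t).getLast hcne ∈ pvMatches line := by
      rw [hE]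
      exact List.getLast_mem hcne
    obtain ⟨k1, wv1, hwv1, hpre1, he1⟩ := mem_pvMatches.mp hmem1
    obtain ⟨kL, wvL, hwvL, hpreL, heL⟩ := mem_pvMatches.mp hmemL
    -- the word at the first position has find = that position
    have hf1ne : PySem.Str.find line wv1.1 ≠ -1 := pvFind_occ hpre1
    obtain ⟨hnn1, hfp1, hfmin1⟩ := pvFind_spec hf1ne
    have hfind1 : PySem.Str.find line wv1.1 = e.1 := by
      have hm : ((((PySem.Str.find line wv1.1).toNat : Nat) : Int), wv1.2) ∈ pvMatches line :=
        mem_pvMatches.mpr ⟨_, wv1, hwv1, hfp1, rfl⟩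
      have hle1 : e.1 ≤ (((PySem.Str.find line wv1.1).toNat : Nat) : Int) := hhead _ hm
      have hnotlt : ¬ k1 < (PySem.Str.find line wv1.1).toNat := fun hlt => hfmin1 k1 hlt hpre1
      have he1' : e.1 = (k1 : Int) := by rw [he1]
      have h1 : k1 ≤ (PySem.Str.find line wv1.1).toNat := by
        rw [he1'] at hle1
        exact_mod_cast hle1
      have h2 : (PySem.Str.find line wv1.1).toNat = k1 := by omega
      rw [he1', ← h2, Int.toNat_of_nonneg hnn1]
    have hlb : ∀ wv ∈ pvW, PySem.Str.find line wv.1 = -1 ∨ e.1 ≤ PySem.Str.find line wv.1 := by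
      intro wv hwv
      by_cases hf : PySem.Str.find line wv.1 = -1
      · exact Or.inl hf
      · right
        obtain ⟨hnn, hpre, -⟩ := pvFind_spec hf
        have hm : ((((PySem.Str.find line wv.1).toNat : Nat) : Int), wv.2) ∈ pvMatches line :=
          mem_pvMatches.mpr ⟨_, wv, hwv, hpre, rfl⟩
        have := hhead _ hm
        rwa [Int.toNat_of_nonneg hnn] at this
    have huq : ∀ wv ∈ pvW, PySem.Str.find line wv.1 = e.1 → wv.2 = e.2 := by
      intro wv hwv hf
      have hnn : 0 ≤ PySem.Str.find line wv.1 := by rw [hf, he1]; positivity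
      obtain ⟨-, hpre, -⟩ := pvFind_spec (by rw [hf, he1]; exact (by omega : ((k1:Int)) ≠ -1))
      have htn : (PySem.Str.find line wv.1).toNat = k1 := by
        rw [hf, he1]
        exact Int.toNat_natCast k1
      rw [htn] at hpre
      have := pvUniq hwv hwv1 hpre hpre1
      rw [this, he1]
    have hne1 : e.1 ≠ -1 := by rw [he1]; omega
    have hfold1 : pvW.foldl (pvG1 line) none = some (e.1, e.2) :=
      pvFoldG1_min line e.1 e.2 pvW hlb huq hne1 none
        (Or.inl ⟨⟨wv1, hwv1, hfind1⟩, Or.inl rfl⟩)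
    -- rfind side
    have hwLne : wvL.1.toList ≠ [] := pvW_ne_nil_words wvL hwvL
    have hfLne : PySem.Str.find line wvL.1 ≠ -1 := pvFind_occ hpreL
    obtain ⟨kR, hrEq, hrPre, hrMax⟩ := pvRfind_spec line wvL.1 hwLne hfLne
    have hrfindL : PySem.Str.rfind line wvL.1 = ((e :: t).getLast hcne).1 := by
      have hm : (((kR : Nat) : Int), wvL.2) ∈ pvMatches line :=
        mem_pvMatches.mpr ⟨_, wvL, hwvL, hrPre, rfl⟩
      have hle : ((kR : Nat) : Int) ≤ ((e :: t).getLast hcne).1 := hlastAll _ hm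
      have heL' : ((e :: t).getLast hcne).1 = (kL : Int) := by rw [heL]
      have h1 : kR ≤ kL := by
        rw [heL'] at hle
        exact_mod_cast hle
      have h2 : ¬ kR < kL := fun hlt => hrMax kL hlt hpreL
      have : kR = kL := by omega
      rw [hrEq, this, heL']
    have hub : ∀ wv ∈ pvW, PySem.Str.find line wv.1 = -1 ∨
        PySem.Str.rfind line wv.1 ≤ ((e :: t).getLast hcne).1 := by
      intro wv hwv
      by_cases hf : PySem.Str.find line wv.1 = -1
      · exact Or.inl hf
      · right
        obtain ⟨k, hkEq, hkPre, -⟩ := pvRfind_spec line wv.1 (pvW_ne_nil_words wv hwv) hf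
        have hm : (((k : Nat) : Int), wv.2) ∈ pvMatches line :=
          mem_pvMatches.mpr ⟨_, wv, hwv, hkPre, rfl⟩
        rw [hkEq]
        exact hlastAll _ hm
    have huq2 : ∀ wv ∈ pvW, PySem.Str.find line wv.1 ≠ -1 →
        PySem.Str.rfind line wv.1 = ((e :: t).getLast hcne).1 → wv.2 = ((e :: t).getLast hcne).2 := by
      intro wv hwv hf hr
      obtain ⟨k, hkEq, hkPre, -⟩ := pvRfind_spec line wv.1 (pvW_ne_nil_words wv hwv) hf
      have heL' : ((e :: t).getLast hcne).1 = (kL : Int) := by rw [heL]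
      have : k = kL := by
        rw [hkEq, heL'] at hr
        exact_mod_cast hr
      rw [this] at hkPre
      have := pvUniq hwv hwvL hkPre hpreL
      rw [this, heL]
    have hfold2 : pvW.foldl (pvG2 line) none = some (((e :: t).getLast hcne).1, ((e :: t).getLast hcne).2) :=
      pvFoldG2_max line ((e :: t).getLast hcne).1 ((e :: t).getLast hcne).2 pvW hub huq2 none
        (Or.inl ⟨⟨wvL, hwvL, hfLne, hrfindL⟩, Or.inl rfl⟩)
    rw [hfold1, hfold2]
    rw [List.getLast?_eq_some_getLast hcne]
    rfl

-- ===== VERDICT (by name: the statement is the Claim_ definition above) =====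
theorem findNumFromText_spec : Claim_equal_findNumFromText := by
  intro line _
  unfold Spec_findNumFromText
  rw [pvA_eq, pvB_eq]
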